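-- pv_equiv track=rewrite | github.com/serenabooth/logic-interpretability | Human_Interpretable_Logic_Statements/code/circuits.py | is_alphanumerically_ordered
-- ===== SOURCE A (Python) =====
-- def is_alphanumerically_ordered(all_decision_variable_paths):
--     """
--     Given list of all pathways from root of DAG to each leaf,
--     and given an ordering pattern, determine whether the
--     pathways adhere to the ordering.
--
--     Parameters
--     ----------
--     all_decision_variable_paths : list
--         A list of list of integers, representing pathways from root to leaves.
--         For example: [[1, 2, 3], [1, 3]] would visit decision nodes 1, 2, 3 on
--         one pathway, and nodes 1 and 3 on another
--
--     Returns
--     -------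
--     True iff all the given decision variable pathways are alphanumerically ordered
--     """
--
--     for path in all_decision_variable_paths:
--         last_node = -1
--
--         for variables in path:
--             if len(variables) == 1:
--                 if abs(variables[0]) < last_node:
--                     return False
--                 else:
--                     last_node = abs(variables[0])
--
--             else:
--                 reordered_variables = sorted(variables)
--                 # if there are multiple decision variables accessible at
--                 # a given node, order them alphanumerically
--                 for variable in reordered_variables:
--                     if abs(variable) < last_node:
--                         return False
--                     else:
--                         last_node = abs(variable)
--     return True
-- ===== SOURCE B (Python) =====
-- def is_alphanumerically_ordered(all_decision_variable_paths):
--     for path in all_decision_variable_paths: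
--         flat = [abs(v) for group in path for v in sorted(group)]
--         if flat != sorted(flat):
--             return False
--     return True
-- ===== Notes on version B (the rewrite author's own statement) =====
-- stated objective: alternative
-- what changed: B replaces A's stateful running-max scan with branch-per-group-size by the sort-and-compare characterisation: build each path's flat list of absolute values (each group sorted by value) and test flat == sorted(flat), i.e. a list is ordered iff it equals its own sort.
import Mathlib
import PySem

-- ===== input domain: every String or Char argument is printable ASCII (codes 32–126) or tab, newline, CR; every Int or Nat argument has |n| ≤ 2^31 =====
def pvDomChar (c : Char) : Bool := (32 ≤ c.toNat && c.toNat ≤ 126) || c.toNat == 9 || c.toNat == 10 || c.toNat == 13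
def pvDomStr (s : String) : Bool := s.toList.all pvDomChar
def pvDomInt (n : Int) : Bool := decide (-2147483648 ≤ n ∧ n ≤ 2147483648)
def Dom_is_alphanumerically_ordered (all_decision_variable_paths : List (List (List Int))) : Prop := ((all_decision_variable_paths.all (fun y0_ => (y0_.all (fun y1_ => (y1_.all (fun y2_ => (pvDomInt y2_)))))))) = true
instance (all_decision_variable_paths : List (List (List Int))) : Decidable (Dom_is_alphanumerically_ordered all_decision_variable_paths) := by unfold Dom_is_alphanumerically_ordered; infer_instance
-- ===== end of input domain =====

-- B replaces A's running-max scan by the sort-and-compare test flat == sorted(flat) per path (objective: alternative).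


-- ===== PORT A =====
-- inner 'for variable in reordered_variables' loop: returns none for 'return False', else the updated last_node
def pvAGroupLoop (last_node : Int) (vs : List Int) : Option Int :=
  match vs with
  | [] => some last_node
  | v :: rest => if |v| < last_node then none else pvAGroupLoop |v| rest

-- 'for variables in path' loop over one path, threading last_node
def pvAPathLoop (last_node : Int) (path : List (List Int)) : Option Int :=
  match path with
  | [] => some last_node
  | g :: rest =>
    if g.length == 1 then
      match PySem.List.pyGet? g 0 with
      | none => none  -- unreachable (length = 1)
      | some v => if |v| < last_node then none else pvAPathLoop |v| rest
    else
      match pvAGroupLoop last_node (PySem.List.sorted g (fun x => x) false) with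
      | none => none
      | some l => pvAPathLoop l rest

-- outer 'for path in …' loop, last_node reset to -1 per path
def pvAPathsLoop (paths : List (List (List Int))) : Bool :=
  match paths with
  | [] => true
  | p :: rest =>
    match pvAPathLoop (-1) p with
    | none => false
    | some _ => pvAPathsLoop rest

def is_alphanumerically_ordered (all_decision_variable_paths : List (List (List Int))) : Bool :=
  pvAPathsLoop all_decision_variable_paths

-- ===== PORT B =====
-- flat = [abs(v) for group in path for v in sorted(group)]
def pvFlatOf (path : List (List Int)) : List Int :=
  path.flatMap (fun g => (PySem.List.sorted g (fun x => x) false).map (fun v => |v|))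

-- per-path test 'flat != sorted(flat): return False', else True at the end
def is_alphanumerically_ordered_alt (all_decision_variable_paths : List (List (List Int))) : Bool :=
  all_decision_variable_paths.all (fun path =>
    pvFlatOf path == PySem.List.sorted (pvFlatOf path) (fun x => x) false)

-- ===== PRECONDITION & SPEC =====
def Spec_is_alphanumerically_ordered (all_decision_variable_paths : List (List (List Int))) (out : Bool) : Prop := out = is_alphanumerically_ordered_alt all_decision_variable_paths
instance (all_decision_variable_paths : List (List (List Int))) (out : Bool) : Decidable (Spec_is_alphanumerically_ordered all_decision_variable_paths out) := by unfold Spec_is_alphanumerically_ordered; infer_instance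

-- ===== CLAIM (what is proved, stated in full; the proofs are below) =====
def Claim_equal_is_alphanumerically_ordered : Prop := ∀ (all_decision_variable_paths : List (List (List Int))), Dom_is_alphanumerically_ordered all_decision_variable_paths → Spec_is_alphanumerically_ordered all_decision_variable_paths (is_alphanumerically_ordered all_decision_variable_paths)

-- ===== LEMMAS AND PROOFS =====

-- generic running-max loop over an already-|·|-mapped sequence
def pvLoop (last : Int) (ws : List Int) : Option Int :=
  match ws with
  | [] => some last
  | w :: rest => if w < last then none else pvLoop w rest

theorem pvAGroupLoop_eq_loop (last : Int) (vs : List Int) :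
    pvAGroupLoop last vs = pvLoop last (vs.map (fun v => |v|)) := by
  induction vs generalizing last with
  | nil => rfl
  | cons v rest ih => simp [pvAGroupLoop, pvLoop, ih]

theorem pvLoop_append (last : Int) (xs ys : List Int) :
    pvLoop last (xs ++ ys) = (pvLoop last xs).bind (fun l => pvLoop l ys) := by
  induction xs generalizing last with
  | nil => rfl
  | cons x rest ih =>
    simp only [List.cons_append, pvLoop]
    split <;> simp [ih]

theorem pvSorted_singleton (v : Int) :
    PySem.List.sorted [v] (fun x : Int => x) false = [v] := by
  apply PySem.List.sorted_eq_self_of_pairwise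
  simp

theorem pvAPathLoop_eq_loop (last : Int) (path : List (List Int)) :
    pvAPathLoop last path = pvLoop last (pvFlatOf path) := by
  induction path generalizing last with
  | nil => rfl
  | cons g rest ih =>
    by_cases hg : g.length = 1
    · obtain ⟨v, rfl⟩ : ∃ v, g = [v] := by
        match g, hg with
        | [v], _ => exact ⟨v, rfl⟩
      simp [pvAPathLoop, pvFlatOf, pvSorted_singleton, pvLoop, PySem.List.pyGet?,
            PySem.List.pyIdx?, ih]
    · have : (g.length == 1) = false := by simpa using hg
      simp only [pvAPathLoop, this, Bool.false_eq_true, if_false,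
        pvAGroupLoop_eq_loop, pvFlatOf, List.flatMap_cons, pvLoop_append]
      cases pvLoop last ((PySem.List.sorted g (fun x => x) false).map (fun v => |v|)) with
      | none => rfl
      | some l => simp [ih, pvFlatOf]

theorem pvLoop_isSome_chain (w : Int) (ws : List Int) :
    (pvLoop w ws).isSome = true ↔ List.IsChain (· ≤ ·) (w :: ws) := by
  induction ws generalizing w with
  | nil => simp [pvLoop]
  | cons w2 rest ih =>
    simp only [pvLoop, List.isChain_cons_cons]
    by_cases h : w2 < w
    · simp [h, show ¬ w ≤ w2 by omega]
    · simp [h, show w ≤ w2 by omega, ih]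

theorem pvLoop_neg_one (ws : List Int) (h : ∀ w ∈ ws, 0 ≤ w) :
    (pvLoop (-1) ws).isSome = true ↔ ws.Pairwise (· ≤ ·) := by
  cases ws with
  | nil => simp [pvLoop]
  | cons w rest =>
    have hw : ¬ w < -1 := by have := h w (by simp); omega
    simp only [pvLoop, hw, if_false]
    rw [pvLoop_isSome_chain, List.isChain_iff_pairwise]

theorem pvFlatOf_nonneg (path : List (List Int)) : ∀ w ∈ pvFlatOf path, 0 ≤ w := by
  intro w hw
  simp only [pvFlatOf, List.mem_flatMap, List.mem_map] at hw
  obtain ⟨g, _, v, _, rfl⟩ := hw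
  exact abs_nonneg v

-- a list is non-decreasing iff it equals its own sort
theorem pvSortFix_iff_pairwise (ws : List Int) :
    (ws == PySem.List.sorted ws (fun x => x) false) = true ↔ ws.Pairwise (· ≤ ·) := by
  constructor
  · intro h
    have he : ws = PySem.List.sorted ws (fun x => x) false := by simpa using h
    rw [he]
    simpa using PySem.List.sorted_pairwise ws (fun x : Int => x)
  · intro h
    have := PySem.List.sorted_eq_self_of_pairwise (key := fun x : Int => x)
      (xs := ws) (by simpa using h)
    simp [this]

theorem pvPath_iff (p : List (List Int)) :
    (pvAPathLoop (-1) p).isSome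
      = (pvFlatOf p == PySem.List.sorted (pvFlatOf p) (fun x => x) false) := by
  rw [pvAPathLoop_eq_loop]
  by_cases h : (pvFlatOf p).Pairwise (· ≤ ·)
  · rw [(pvLoop_neg_one _ (pvFlatOf_nonneg p)).mpr h,
        (pvSortFix_iff_pairwise _).mpr h]
  · have h1 : (pvLoop (-1) (pvFlatOf p)).isSome ≠ true := fun hc =>
      h ((pvLoop_neg_one _ (pvFlatOf_nonneg p)).mp hc)
    have h2 : (pvFlatOf p == PySem.List.sorted (pvFlatOf p) (fun x => x) false) ≠ true :=
      fun hc => h ((pvSortFix_iff_pairwise _).mp hc)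
    simp only [Bool.not_eq_true] at h1 h2
    rw [h1, h2]

theorem pvTop (paths : List (List (List Int))) :
    pvAPathsLoop paths = paths.all (fun path =>
      pvFlatOf path == PySem.List.sorted (pvFlatOf path) (fun x => x) false) := by
  induction paths with
  | nil => rfl
  | cons p rest ih =>
    have h := pvPath_iff p
    simp only [pvAPathsLoop, List.all_cons]
    cases hp : pvAPathLoop (-1) p with
    | none =>
      have hb : (pvFlatOf p == PySem.List.sorted (pvFlatOf p) (fun x => x) false) = false := by
        rw [hp] at h; exact h.symm
      simp [hb]
    | some l =>
      have hb : (pvFlatOf p == PySem.List.sorted (pvFlatOf p) (fun x => x) false) = true := by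
        rw [hp] at h; exact h.symm
      simp [hb, ih]

-- ===== VERDICT (by name: the statement is the Claim_ definition above) =====
theorem is_alphanumerically_ordered_spec : Claim_equal_is_alphanumerically_ordered := by
  intro paths _
  unfold Spec_is_alphanumerically_ordered is_alphanumerically_ordered is_alphanumerically_ordered_alt
  exact pvTop paths
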